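-- pv_equiv track=rewrite | github.com/provnai/McpVanguard | core/proxy.py | _is_destructive_tool_name
-- ===== SOURCE A (Python) =====
-- def _is_destructive_tool_name(tool_name: str) -> bool:
--     destructive_prefixes = (
--         "delete_",
--         "remove_",
--         "update_",
--         "set_",
--         "write_",
--         "enforce_",
--         "block_",
--         "reset_",
--         "clear_",
--         "apply_",
--         "push_",
--         "exec_",
--         "shell_",
--     )
--     return any(tool_name.startswith(prefix) for prefix in destructive_prefixes)
-- ===== SOURCE B (Python) =====
-- _DESTRUCTIVE_ROOTS = frozenset({
--     "delete", "remove", "update", "set", "write", "enforce", "block",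
--     "reset", "clear", "apply", "push", "exec", "shell",
-- })
--
--
-- def _is_destructive_tool_name(tool_name: str) -> bool:
--     # Single left-to-right scan: collect the head up to the first underscore,
--     # then decide with one set lookup; no underscore means not destructive.
--     head = []
--     for ch in tool_name:
--         if ch == "_":
--             return "".join(head) in _DESTRUCTIVE_ROOTS
--         head.append(ch)
--     return False
-- ===== Notes on version B (the rewrite author's own statement) =====
-- stated objective: alternative
-- what changed: Instead of testing the name against 13 startswith prefixes, B scans the characters once, accumulating the head up to the first underscore, and decides with a single set lookup of that head among the 13 roots.
import Mathlib
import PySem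

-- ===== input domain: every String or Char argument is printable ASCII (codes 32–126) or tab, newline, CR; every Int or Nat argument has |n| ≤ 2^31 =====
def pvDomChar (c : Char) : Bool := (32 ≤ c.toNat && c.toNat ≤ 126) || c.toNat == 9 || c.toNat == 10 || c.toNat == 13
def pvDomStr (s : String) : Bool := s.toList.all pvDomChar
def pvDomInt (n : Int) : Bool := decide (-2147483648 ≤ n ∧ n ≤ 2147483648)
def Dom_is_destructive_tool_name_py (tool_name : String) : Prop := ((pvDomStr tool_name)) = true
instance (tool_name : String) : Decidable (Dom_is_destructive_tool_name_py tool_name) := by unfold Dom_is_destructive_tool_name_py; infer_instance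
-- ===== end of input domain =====

-- B replaces A's scan over 13 startswith tests by ONE character-by-character scan
-- accumulating the head before the first underscore, decided by a set lookup.

-- ===== PORT A =====
-- the tuple of destructive prefixes, in A's order
def pvDestructivePrefixes : List String :=
  ["delete_", "remove_", "update_", "set_", "write_", "enforce_", "block_",
   "reset_", "clear_", "apply_", "push_", "exec_", "shell_"]

def is_destructive_tool_name_py (tool_name : String) : Bool :=
  pvDestructivePrefixes.any (fun prefix_ => PySem.Str.startswith tool_name prefix_)

-- ===== PORT B =====
-- the frozenset of destructive roots (underscore-free words)
def pvDestructiveRoots : PySem.Set String :=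
  PySem.Set.ofList
    ["delete", "remove", "update", "set", "write", "enforce", "block",
     "reset", "clear", "apply", "push", "exec", "shell"]

-- the for-loop of Source B: walk the chars, `acc` is the reversed `head` list so far;
-- at the first '_' return the set lookup of the joined head, at end return false
def pvScanHead : List Char → List Char → Bool
  | [], _ => false
  | c :: rest, acc =>
      if c = '_' then pvDestructiveRoots.contains (String.ofList acc.reverse)
      else pvScanHead rest (c :: acc)

def is_destructive_tool_name_py_alt (tool_name : String) : Bool :=
  pvScanHead tool_name.toList []

-- ===== PRECONDITION & SPEC =====
def Spec_is_destructive_tool_name_py (tool_name : String) (out : Bool) : Prop := out = is_destructive_tool_name_py_alt tool_name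
instance (tool_name : String) (out : Bool) : Decidable (Spec_is_destructive_tool_name_py tool_name out) := by unfold Spec_is_destructive_tool_name_py; infer_instance

-- ===== CLAIM (what is proved, stated in full; the proofs are below) =====
def Claim_equal_is_destructive_tool_name_py : Prop := ∀ (tool_name : String), Dom_is_destructive_tool_name_py tool_name → Spec_is_destructive_tool_name_py tool_name (is_destructive_tool_name_py tool_name)

-- ===== LEMMAS AND PROOFS =====

-- the scan computes: "some '_' occurs, and the chars before the first '_' (after acc) name a root"
lemma pvScanHead_char (cs acc : List Char) :
    pvScanHead cs acc
      = (cs.contains '_' &&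
         pvDestructiveRoots.contains
           (String.ofList (acc.reverse ++ cs.takeWhile (fun c => c ≠ '_')))) := by
  induction cs generalizing acc with
  | nil => simp [pvScanHead]
  | cons c rest ih =>
    by_cases hc : c = '_'
    · subst hc; simp [pvScanHead]
    · simp only [pvScanHead, if_neg hc, ih, List.contains_cons, List.takeWhile_cons]
      rw [if_pos (by simpa using hc)]
      have hcb : ('_' == c) = false := by simpa using Ne.symm hc
      simp [hcb, List.append_assoc]

-- For an underscore-free root r, "r_ is a prefix of cs" is exactly
-- "cs contains '_' and the chars before the first '_' are r".
lemma prefix_underscore_iff (r cs : List Char) (h : '_' ∉ r) :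
    ((r ++ ['_']) <+: cs) ↔ ('_' ∈ cs ∧ cs.takeWhile (fun c => c ≠ '_') = r) := by
  constructor
  · rintro ⟨t, rfl⟩
    refine ⟨by simp, ?_⟩
    induction r with
    | nil => simp
    | cons a as ih =>
      simp only [List.mem_cons, not_or] at h
      simp only [List.cons_append, List.takeWhile_cons]
      rw [if_pos (by simpa using Ne.symm h.1)]
      simpa using ih h.2
  · rintro ⟨hmem, hr⟩
    have hsplit := List.takeWhile_append_dropWhile (p := fun c => decide (c ≠ '_')) (l := cs)
    have hdne : cs.dropWhile (fun c => decide (c ≠ '_')) ≠ [] := by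
      intro hnil
      rw [hnil, List.append_nil, hr] at hsplit
      exact h (hsplit ▸ hmem)
    obtain ⟨b, bs, hbs⟩ := List.exists_cons_of_ne_nil hdne
    have hh := List.head_dropWhile_not (fun c => decide (c ≠ '_')) hdne
    have hsome : some ((cs.dropWhile (fun c => decide (c ≠ '_'))).head hdne) = some b := by
      rw [← List.head?_eq_some_head, hbs]; rfl
    have hb : b = '_' := by
      have hhb := Option.some.inj hsome ▸ hh
      simpa using hhb
    refine ⟨bs, ?_⟩
    rw [← hsplit, hr, hbs, hb]; simp

lemma ofList_beq_eq (t : List Char) (r : String) :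
    (String.ofList t == r) = decide (t = r.toList) := by
  by_cases h : t = r.toList
  · subst h; simp
  · simp only [h, decide_false, beq_eq_false_iff_ne, ne_eq]
    intro he; exact h (by rw [← he]; simp)

-- ===== VERDICT (by name: the statement is the Claim_ definition above) =====
theorem is_destructive_tool_name_py_spec : Claim_equal_is_destructive_tool_name_py := by
  intro s _
  unfold Spec_is_destructive_tool_name_py is_destructive_tool_name_py is_destructive_tool_name_py_alt
  rw [pvScanHead_char]
  have key : ∀ r : List Char, '_' ∉ r →
      PySem.Chars.startswith s.toList (r ++ ['_'])
        = (s.toList.contains '_' && decide (s.toList.takeWhile (fun c => c ≠ '_') = r)) := by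
    intro r hr
    rw [Bool.eq_iff_iff, PySem.Chars.startswith_iff, prefix_underscore_iff r s.toList hr]
    simp
  rw [show pvDestructiveRoots = ["delete", "remove", "update", "set", "write", "enforce",
        "block", "reset", "clear", "apply", "push", "exec", "shell"] from by decide]
  simp only [pvDestructivePrefixes, List.any_cons, List.any_nil, PySem.Str.startswith_eq,
    List.reverse_nil, List.nil_append]
  rw [show ("delete_" : String).toList = ("delete" : String).toList ++ ['_'] by decide]
  rw [show ("remove_" : String).toList = ("remove" : String).toList ++ ['_'] by decide]
  rw [show ("update_" : String).toList = ("update" : String).toList ++ ['_'] by decide]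
  rw [show ("set_" : String).toList = ("set" : String).toList ++ ['_'] by decide]
  rw [show ("write_" : String).toList = ("write" : String).toList ++ ['_'] by decide]
  rw [show ("enforce_" : String).toList = ("enforce" : String).toList ++ ['_'] by decide]
  rw [show ("block_" : String).toList = ("block" : String).toList ++ ['_'] by decide]
  rw [show ("reset_" : String).toList = ("reset" : String).toList ++ ['_'] by decide]
  rw [show ("clear_" : String).toList = ("clear" : String).toList ++ ['_'] by decide]
  rw [show ("apply_" : String).toList = ("apply" : String).toList ++ ['_'] by decide]
  rw [show ("push_" : String).toList = ("push" : String).toList ++ ['_'] by decide]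
  rw [show ("exec_" : String).toList = ("exec" : String).toList ++ ['_'] by decide]
  rw [show ("shell_" : String).toList = ("shell" : String).toList ++ ['_'] by decide]
  rw [key _ (by decide), key _ (by decide), key _ (by decide), key _ (by decide),
      key _ (by decide), key _ (by decide), key _ (by decide), key _ (by decide),
      key _ (by decide), key _ (by decide), key _ (by decide), key _ (by decide),
      key _ (by decide)]
  simp only [PySem.Set.contains, List.contains_cons, List.contains_nil, ofList_beq_eq]
  cases s.toList.contains '_' <;> simp
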